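-- pv_equiv track=rewrite | github.com/KarthusL/UMASS_CS383_Projects | Homework/HW2-Regular and MRV sudoku_solver/code/my_hw2.py | get_all_state
-- ===== SOURCE A (Python) =====
-- def get_all_state(puzzle):
--     all_state = []
--     flattened = [val for num in puzzle for val in num]
--     for number in flattened:
--         if number == 0:
--             position = flattened.index(number)
--             all_state.append([position % 9, position // 9])
--             flattened[position] = "*"
--     return all_state
-- ===== SOURCE B (Python) =====
-- def get_all_state(puzzle):
--     flat = [v for row in puzzle for v in row]
--     return [[i % 9, i // 9] for i, v in enumerate(flat) if v == 0]
-- ===== Notes on version B (the rewrite author's own statement) =====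
-- stated objective: faster
-- what changed: Replaces the mutate-and-rescan loop (repeated flattened.index(0) plus '*'-marking) by a single enumerate pass over the flattened list, so the inner rescan disappears.
import Mathlib
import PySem

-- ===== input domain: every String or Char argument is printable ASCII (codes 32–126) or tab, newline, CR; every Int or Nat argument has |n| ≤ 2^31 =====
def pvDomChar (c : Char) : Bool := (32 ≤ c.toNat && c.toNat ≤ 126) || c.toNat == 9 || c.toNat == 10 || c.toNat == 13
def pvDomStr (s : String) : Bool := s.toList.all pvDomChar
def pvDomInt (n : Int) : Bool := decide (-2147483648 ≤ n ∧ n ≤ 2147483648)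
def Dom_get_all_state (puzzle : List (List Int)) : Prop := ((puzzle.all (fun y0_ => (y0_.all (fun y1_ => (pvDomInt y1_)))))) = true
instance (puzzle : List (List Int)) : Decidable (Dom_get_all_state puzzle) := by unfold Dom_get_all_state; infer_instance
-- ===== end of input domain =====

-- B replaces A's mutate-and-rescan (.index(0) + "*" marking) by one enumerate pass: same output, O(n) instead of O(n^2).

-- ===== PORT A =====
-- A's flattened list holds ints that get overwritten by the string "*"; ported as
-- List (Option Int) with none = "*" (exact: "*" == 0 is False in Python, none ≠ some 0 here).
-- 'for number in flattened' iterates by index over the list being mutated (length unchanged).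
def get_all_state_loop (flat : List (Option Int)) (acc : List (List Int)) (i : Nat) :
    List (List Int) :=
  match _h : flat[i]? with
  | none => acc
  | some number =>
    if number = some 0 then
      let position := flat.findIdx (· = some 0)
      get_all_state_loop (flat.set position none)
        (acc ++ [[PySem.Int.mod (position : Int) 9, PySem.Int.floordiv (position : Int) 9]])
        (i + 1)
    else get_all_state_loop flat acc (i + 1)
termination_by flat.length - i
decreasing_by
  · simp only [List.length_set]
    have : i < flat.length := by
      by_contra hc
      rw [List.getElem?_eq_none (by omega)] at _h
      exact absurd _h (by simp)
    omega
  · have : i < flat.length := by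
      by_contra hc
      rw [List.getElem?_eq_none (by omega)] at _h
      exact absurd _h (by simp)
    omega

def get_all_state (puzzle : List (List Int)) : List (List Int) :=
  let flattened := (puzzle.flatMap (fun num => num)).map some
  get_all_state_loop flattened [] 0

-- ===== PORT B =====
def get_all_state_alt (puzzle : List (List Int)) : List (List Int) :=
  let flat := puzzle.flatMap (fun row => row)
  ((PySem.List.enumerate flat 0).filter (fun p => p.2 = 0)).map
    (fun p => [PySem.Int.mod p.1 9, PySem.Int.floordiv p.1 9])

-- ===== PRECONDITION & SPEC =====
def Spec_get_all_state (puzzle : List (List Int)) (out : List (List Int)) : Prop := out = get_all_state_alt puzzle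
instance (puzzle : List (List Int)) (out : List (List Int)) : Decidable (Spec_get_all_state puzzle out) := by unfold Spec_get_all_state; infer_instance

-- ===== CLAIM (what is proved, stated in full; the proofs are below) =====
def Claim_equal_get_all_state : Prop := ∀ (puzzle : List (List Int)), Dom_get_all_state puzzle → Spec_get_all_state puzzle (get_all_state puzzle)

-- ===== LEMMAS AND PROOFS =====

-- A's flattened list after the first i cells have been visited: zeros at indices < i are "*".
def pvMark (f : List Int) (i : Nat) : List (Option Int) :=
  f.zipIdx.map (fun p => if p.2 < i ∧ p.1 = 0 then none else some p.1)

-- the residual output produced from cell i onwards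
def pvSol (f : List Int) (i : Nat) : List (List Int) :=
  (((PySem.List.enumerate f 0).drop i).filter (fun p => p.2 = 0)).map
    (fun p => [PySem.Int.mod p.1 9, PySem.Int.floordiv p.1 9])

theorem pvMark_zero (f : List Int) : pvMark f 0 = f.map some := by
  apply List.ext_getElem (by simp [pvMark])
  intro j h1 h2
  simp [pvMark]

theorem pvMark_length (f : List Int) (i : Nat) : (pvMark f i).length = f.length := by
  simp [pvMark]

theorem pvMark_getElem (f : List Int) (i j : Nat) (hj : j < f.length) :
    (pvMark f i)[j]'(by rw [pvMark_length]; exact hj) =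
      if j < i ∧ f[j] = 0 then none else some f[j] := by
  simp [pvMark]

theorem pvMark_findIdx (f : List Int) (i : Nat) (hi : i < f.length) (h0 : f[i] = 0) :
    (pvMark f i).findIdx (· = some 0) = i := by
  rw [List.findIdx_eq (by rw [pvMark_length]; exact hi)]
  constructor
  · simp [pvMark_getElem f i i hi, h0]
  · intro j hj
    have hjf : j < f.length := lt_trans hj hi
    rw [pvMark_getElem f i j hjf]
    by_cases hz : f[j] = 0 <;> simp [hz, hj]

theorem pvMark_set (f : List Int) (i : Nat) (hi : i < f.length) (h0 : f[i] = 0) :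
    (pvMark f i).set i none = pvMark f (i + 1) := by
  apply List.ext_getElem (by simp [pvMark_length])
  intro j h1 h2
  have hjf : j < f.length := by simpa [pvMark_length] using h2
  rw [List.getElem_set, pvMark_getElem f (i + 1) j hjf]
  by_cases hji : j = i
  · subst hji; simp [h0]
  · rw [if_neg (fun he => hji he.symm), pvMark_getElem f i j hjf]
    have : (j < i ∧ f[j] = 0) ↔ (j < i + 1 ∧ f[j] = 0) := by
      constructor <;> rintro ⟨h, hz⟩ <;> exact ⟨by omega, hz⟩
    simp only [this]

theorem pvMark_succ_of_ne (f : List Int) (i : Nat) (hi : i < f.length) (h0 : f[i] ≠ 0) :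
    pvMark f i = pvMark f (i + 1) := by
  apply List.ext_getElem (by simp [pvMark_length])
  intro j h1 h2
  have hjf : j < f.length := by simpa [pvMark_length] using h2
  rw [pvMark_getElem f i j hjf, pvMark_getElem f (i + 1) j hjf]
  by_cases hji : j = i
  · subst hji; simp [h0]
  · have : (j < i ∧ f[j] = 0) ↔ (j < i + 1 ∧ f[j] = 0) := by
      constructor <;> rintro ⟨h, hz⟩ <;> refine ⟨by omega, hz⟩
    simp only [this]

theorem pvSol_step (f : List Int) (i : Nat) (hi : i < f.length) :
    pvSol f i =
      (if f[i] = 0 then [[PySem.Int.mod (i : Int) 9, PySem.Int.floordiv (i : Int) 9]] else [])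
        ++ pvSol f (i + 1) := by
  have hlen : i < (PySem.List.enumerate f 0).length := by
    rw [PySem.List.length_enumerate]; exact hi
  have hdrop : (PySem.List.enumerate f 0).drop i =
      (PySem.List.enumerate f 0)[i] :: (PySem.List.enumerate f 0).drop (i + 1) :=
    List.drop_eq_getElem_cons hlen
  have hget : (PySem.List.enumerate f 0)[i] = ((i : Int), f[i]) := by
    rw [PySem.List.getElem_enumerate]; simp
  rw [pvSol, hdrop, hget]
  by_cases hz : f[i] = 0 <;> simp [hz, pvSol]

theorem pvSol_nil (f : List Int) (i : Nat) (hi : f.length ≤ i) : pvSol f i = [] := by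
  have : (PySem.List.enumerate f 0).drop i = [] := by
    apply List.drop_eq_nil_of_le
    rw [PySem.List.length_enumerate]; exact hi
  simp [pvSol, this]

theorem loop_eq (f : List Int) : ∀ (k i : Nat) (acc : List (List Int)),
    f.length - i = k → get_all_state_loop (pvMark f i) acc i = acc ++ pvSol f i := by
  intro k
  induction k with
  | zero =>
    intro i acc hk
    have hi : f.length ≤ i := by omega
    have : (pvMark f i)[i]? = none := by
      apply List.getElem?_eq_none
      rw [pvMark_length]; exact hi
    rw [get_all_state_loop, this, pvSol_nil f i hi, List.append_nil]
  | succ k ih =>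
    intro i acc hk
    have hi : i < f.length := by omega
    have hget : (pvMark f i)[i]? = some (if i < i ∧ f[i] = 0 then none else some f[i]) := by
      rw [List.getElem?_eq_getElem (by rw [pvMark_length]; exact hi), pvMark_getElem f i i hi]
    have hget' : (pvMark f i)[i]? = some (some f[i]) := by simp [hget]
    rw [get_all_state_loop, hget']
    dsimp only
    by_cases hz : f[i] = 0
    · rw [if_pos (by simp [hz])]
      rw [pvMark_findIdx f i hi hz, pvMark_set f i hi hz,
        ih (i + 1) _ (by omega), pvSol_step f i hi, if_pos hz, List.append_assoc]
    · rw [if_neg (by simp [hz])]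
      rw [pvMark_succ_of_ne f i hi hz, ih (i + 1) _ (by omega),
        pvSol_step f i hi, if_neg hz, List.nil_append]

-- ===== VERDICT (by name: the statement is the Claim_ definition above) =====
theorem get_all_state_spec : Claim_equal_get_all_state := by
  intro puzzle _
  unfold Spec_get_all_state get_all_state get_all_state_alt
  rw [← pvMark_zero, loop_eq (puzzle.flatMap (fun num => num)) _ 0 [] rfl]
  simp [pvSol]
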